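-- pv_equiv track=rewrite | github.com/pdl260605/VRP_DRL_GNN | PyTorch_GNN/run_gui.py | get_routes_from_pi
-- ===== SOURCE A (Python) =====
-- def get_routes_from_pi(pi_row):
--     routes, cur = [], []
--     for node in pi_row:
--         if node == 0:
--             if cur:
--                 routes.append(cur)
--                 cur = []
--         else:
--             cur.append(int(node) - 1)
--     if cur:
--         routes.append(cur)
--     return routes
-- ===== SOURCE B (Python) =====
-- def get_routes_from_pi(pi_row):
--     def split(seq):
--         if not seq:
--             return []
--         try:
--             k = seq.index(0)
--         except ValueError:
--             return [seq]
--         return ([seq[:k]] if k != 0 else []) + split(seq[k + 1:])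
--     return [[int(v) - 1 for v in seg] for seg in split(list(pi_row))]
-- ===== Notes on version B (the rewrite author's own statement) =====
-- stated objective: alternative
-- what changed: Replaces A's one-pass accumulator state machine (routes/cur flushed on each zero) by a recursive divide-and-conquer: locate the first zero with list.index, slice off the segment before it, recurse on the suffix after it, and map segments to v-1 in a final comprehension.
import Mathlib
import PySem

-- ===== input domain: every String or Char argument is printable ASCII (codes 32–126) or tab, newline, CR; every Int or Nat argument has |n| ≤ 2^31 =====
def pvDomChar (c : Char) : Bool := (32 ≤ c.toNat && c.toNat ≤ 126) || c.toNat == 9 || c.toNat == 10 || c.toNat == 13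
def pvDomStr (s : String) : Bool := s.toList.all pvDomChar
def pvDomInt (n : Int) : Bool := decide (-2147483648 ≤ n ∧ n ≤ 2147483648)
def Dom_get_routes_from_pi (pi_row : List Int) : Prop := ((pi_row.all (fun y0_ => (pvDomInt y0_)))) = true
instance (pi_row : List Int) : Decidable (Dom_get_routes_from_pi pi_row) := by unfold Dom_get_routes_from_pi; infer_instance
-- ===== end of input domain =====

-- B replaces A's one-pass accumulator state machine by a recursive divide on the first
-- zero (index, slice, recurse), mapping segments to v-1 at the end: alternative, same task.


-- ===== PORT A =====
-- state = (routes, cur); flush cur on a zero, else append node-1; final flush of cur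
def get_routes_from_pi (pi_row : List Int) : List (List Int) :=
  let s := pi_row.foldl
    (fun (s : List (List Int) × List Int) node =>
      if node = 0 then
        (if s.2 ≠ [] then (s.1 ++ [s.2], ([] : List Int)) else s)
      else
        (s.1, s.2 ++ [node - 1]))
    ([], [])
  if s.2 ≠ [] then s.1 ++ [s.2] else s.1

-- ===== PORT B =====
-- split(seq): find the first zero with seq.index(0); no zero -> [seq];
-- else keep seq[:k] (if nonempty) and recurse on seq[k+1:]
def pvSplit (seq : List Int) : List (List Int) :=
  if _h : seq = [] then []
  else
    match PySem.List.index? seq 0 with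
    | none => [seq]
    | some k =>
      (if k ≠ 0 then [PySem.List.slice seq none (some (k : Int))] else []) ++
        pvSplit (PySem.List.slice seq (some ((k : Int) + 1)) none)
termination_by seq.length
decreasing_by
  have hs : PySem.List.slice seq (some ((k : Int) + 1)) none = seq.drop (k + 1) := by
    have := PySem.List.slice_from_natCast seq (k + 1)
    push_cast at this
    exact this
  rw [hs]
  have hne : seq.length ≠ 0 := fun hl => _h (List.eq_nil_of_length_eq_zero hl)
  simp only [List.length_drop]
  omega

-- the final comprehension: map each segment's elements to v - 1
def get_routes_from_pi_alt (pi_row : List Int) : List (List Int) :=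
  (pvSplit pi_row).map (fun seg => seg.map (fun v => v - 1))

-- ===== PRECONDITION & SPEC =====
def Spec_get_routes_from_pi (pi_row : List Int) (out : List (List Int)) : Prop := out = get_routes_from_pi_alt pi_row
instance (pi_row : List Int) (out : List (List Int)) : Decidable (Spec_get_routes_from_pi pi_row out) := by unfold Spec_get_routes_from_pi; infer_instance

-- ===== CLAIM (what is proved, stated in full; the proofs are below) =====
def Claim_equal_get_routes_from_pi : Prop := ∀ (pi_row : List Int), Dom_get_routes_from_pi pi_row → Spec_get_routes_from_pi pi_row (get_routes_from_pi pi_row)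

-- ===== LEMMAS AND PROOFS =====

lemma pvSplit_nil : pvSplit [] = [] := by rw [pvSplit]; simp

lemma pvSplit_zero_cons (xs : List Int) : pvSplit (0 :: xs) = pvSplit xs := by
  rw [pvSplit, dif_neg (List.cons_ne_nil _ _),
    PySem.List.index?_cons_self]
  simp [PySem.List.slice_from_one]

lemma pvSplit_single (x : Int) (hx : x ≠ 0) : pvSplit [x] = [[x]] := by
  have hn : PySem.List.index? [x] (0 : Int) = none := by
    rw [PySem.List.index?_eq_none_iff]; simp [Ne.symm hx]
  rw [pvSplit, dif_neg (List.cons_ne_nil _ _), hn]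

lemma slice_take (seq : List Int) (k : Nat) :
    PySem.List.slice seq none (some (k : Int)) = seq.take k :=
  PySem.List.slice_to_natCast seq k

lemma slice_drop_succ (seq : List Int) (k : Nat) :
    PySem.List.slice seq (some ((k : Int) + 1)) none = seq.drop (k + 1) := by
  have := PySem.List.slice_from_natCast seq (k + 1)
  push_cast at this
  exact this

lemma pvSplit_nonzero_zero (x : Int) (hx : x ≠ 0) (ys : List Int) :
    pvSplit (x :: 0 :: ys) = [x] :: pvSplit ys := by
  have hi : PySem.List.index? (x :: 0 :: ys) (0 : Int) = some 1 := by
    rw [PySem.List.index?_cons_of_ne _ hx, PySem.List.index?_cons_self]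
    rfl
  rw [pvSplit, dif_neg (List.cons_ne_nil _ _), hi]
  simp only [ne_eq, Nat.one_ne_zero, not_false_iff, if_true, slice_take, slice_drop_succ]
  simp

lemma pvSplit_head (y : Int) (hy : y ≠ 0) (ys : List Int) :
    ∃ g rest, pvSplit (y :: ys) = (y :: g) :: rest ∧
      ∀ x, x ≠ 0 → pvSplit (x :: y :: ys) = (x :: y :: g) :: rest := by
  cases hm : PySem.List.index? (y :: ys) (0 : Int) with
  | none =>
    refine ⟨ys, [], ?_, ?_⟩
    · rw [pvSplit, dif_neg (List.cons_ne_nil _ _), hm]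
    · intro x hx
      have hn : PySem.List.index? (x :: y :: ys) (0 : Int) = none := by
        rw [PySem.List.index?_cons_of_ne _ hx, hm]; rfl
      rw [pvSplit, dif_neg (List.cons_ne_nil _ _), hn]
  | some m =>
    have hm' : PySem.List.index? (y :: ys) (0 : Int) = (PySem.List.index? ys 0).map (· + 1) :=
      PySem.List.index?_cons_of_ne _ hy
    rw [hm] at hm'
    cases hys : PySem.List.index? ys (0 : Int) with
    | none => rw [hys] at hm'; simp at hm'
    | some m' =>
      rw [hys] at hm'
      simp only [Option.map_some] at hm'
      have hmm : m = m' + 1 := Option.some.inj hm'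
      subst hmm
      refine ⟨ys.take m', pvSplit (ys.drop (m' + 1)), ?_, ?_⟩
      · rw [pvSplit, dif_neg (List.cons_ne_nil _ _), hm]
        simp only [ne_eq, Nat.succ_ne_zero, not_false_iff, if_true, slice_take,
          slice_drop_succ, List.take_succ_cons, List.drop_succ_cons]
        simp
      · intro x hx
        have hi : PySem.List.index? (x :: y :: ys) (0 : Int) = some (m' + 2) := by
          rw [PySem.List.index?_cons_of_ne _ hx, hm]
          rfl
        rw [pvSplit, dif_neg (List.cons_ne_nil _ _), hi]
        simp only [ne_eq, Nat.succ_ne_zero, not_false_iff, if_true, slice_take,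
          slice_drop_succ, List.take_succ_cons, List.drop_succ_cons]
        simp

lemma alt_nil : get_routes_from_pi_alt [] = [] := by
  simp [get_routes_from_pi_alt, pvSplit_nil]

lemma alt_single (x : Int) (hx : x ≠ 0) : get_routes_from_pi_alt [x] = [[x - 1]] := by
  simp [get_routes_from_pi_alt, pvSplit_single x hx]

lemma alt_zero (xs : List Int) :
    get_routes_from_pi_alt (0 :: xs) = get_routes_from_pi_alt xs := by
  simp [get_routes_from_pi_alt, pvSplit_zero_cons]

lemma alt_nonzero_zero (x : Int) (hx : x ≠ 0) (ys : List Int) :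
    get_routes_from_pi_alt (x :: 0 :: ys) =
      [x - 1] :: get_routes_from_pi_alt (0 :: ys) := by
  simp [get_routes_from_pi_alt, pvSplit_nonzero_zero x hx, pvSplit_zero_cons]

lemma alt_nonzero_nonzero (x y : Int) (hx : x ≠ 0) (hy : y ≠ 0) (ys : List Int) :
    ∃ r rest, get_routes_from_pi_alt (y :: ys) = r :: rest ∧
      get_routes_from_pi_alt (x :: y :: ys) = ((x - 1) :: r) :: rest := by
  obtain ⟨g, tail, h1, h2⟩ := pvSplit_head y hy ys
  exact ⟨(y :: g).map (fun v => v - 1), tail.map (fun seg => seg.map (fun v => v - 1)),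
    by simp [get_routes_from_pi_alt, h1],
    by simp [get_routes_from_pi_alt, h2 x hx]⟩

-- A with its accumulator factored out: prepA cur xs = remaining routes given pending cur
def prepA (cur : List Int) : List Int → List (List Int)
  | [] => if cur ≠ [] then [cur] else []
  | x :: xs =>
    if x = 0 then (if cur ≠ [] then cur :: prepA [] xs else prepA [] xs)
    else prepA (cur ++ [x - 1]) xs

-- glue a pending (possibly empty) route onto B's result of the tail
def glueB (cur : List Int) (xs : List Int) : List (List Int) :=
  if cur = [] then get_routes_from_pi_alt xs
  else match xs with
    | [] => [cur]
    | x :: _ =>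
      if x = 0 then cur :: get_routes_from_pi_alt xs
      else match get_routes_from_pi_alt xs with
        | r :: rest => (cur ++ r) :: rest
        | [] => [cur]

lemma prepA_eq_glueB (xs : List Int) : ∀ cur, prepA cur xs = glueB cur xs := by
  induction xs with
  | nil =>
    intro cur
    by_cases h : cur = [] <;> simp [prepA, glueB, alt_nil, h]
  | cons x xs ih =>
    intro cur
    by_cases hx : x = 0
    · subst hx
      by_cases hc : cur = []
      · simp [prepA, glueB, hc, ih, alt_zero]
      · simp [prepA, glueB, hc, ih, alt_zero]
    · have step : prepA cur (x :: xs) = glueB (cur ++ [x - 1]) xs := by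
        simp [prepA, hx, ih]
      rw [step]
      rcases xs with _ | ⟨y, ys⟩
      · by_cases hc : cur = [] <;>
          simp [glueB, hx, hc, alt_single x hx]
      · by_cases hy : y = 0
        · subst hy
          have halt := alt_nonzero_zero x hx ys
          by_cases hc : cur = [] <;>
            simp [glueB, hx, hc, halt]
        · obtain ⟨r, rest, h1, h2⟩ := alt_nonzero_nonzero x y hx hy ys
          by_cases hc : cur = [] <;>
            simp [glueB, hx, hy, hc, h1, h2]

lemma loopA (xs : List Int) : ∀ routes cur,
    (let s := xs.foldl
      (fun (s : List (List Int) × List Int) node =>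
        if node = 0 then
          (if s.2 ≠ [] then (s.1 ++ [s.2], ([] : List Int)) else s)
        else
          (s.1, s.2 ++ [node - 1]))
      (routes, cur)
     if s.2 ≠ [] then s.1 ++ [s.2] else s.1) = routes ++ prepA cur xs := by
  induction xs with
  | nil =>
    intro routes cur
    by_cases h : cur = [] <;> simp [prepA, h]
  | cons x xs ih =>
    intro routes cur
    by_cases hx : x = 0
    · subst hx
      by_cases hc : cur = []
      · simpa [prepA, hc] using ih routes []
      · simpa [prepA, hc] using ih (routes ++ [cur]) []
    · simpa [prepA, hx] using ih routes (cur ++ [x - 1])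

-- ===== VERDICT (by name: the statement is the Claim_ definition above) =====
theorem get_routes_from_pi_spec : Claim_equal_get_routes_from_pi := by
  intro pi_row _
  show get_routes_from_pi pi_row = get_routes_from_pi_alt pi_row
  have h := loopA pi_row [] []
  simp only [get_routes_from_pi]
  rw [h, prepA_eq_glueB]
  simp [glueB]
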